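-- pv_equiv track=rewrite | github.com/ChinmayRai/Automatically-Curated-Accident-Maps | processing/openie_trials/test_body/casualty/num_casualty.py | num_casualty
-- ===== SOURCE A (Python) =====
-- def num_casualty(s):
-- 	s=s.replace('-',' ')
-- 	# print s
-- 	l=s.split(' ')
-- 	ans=[]
-- 	d={'one':1,'two':2,'three':3,'four':4,'five':5,'six':6,'seven':7,'eight':8,'nine':9,'ten':10,'he':1,'she':1}
-- 	for i in range(len(l)):
-- 		foundNumber=False
-- 		if(l[i].isdigit()):
-- 			tup=tuple((int(l[i]),i))
-- 			foundNumber=True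
-- 		elif(l[i] in d.keys()):
-- 			tup=tuple((d[l[i]],i))
-- 			foundNumber=True
-- 		# exclude number if followed by 'year'
-- 		if( foundNumber and not(i+1<len(l) and l[i+1]=="year") and not( i-1>=0 and l[i-1]=="," and i+1<len(l) and l[i+1]=="," )):
-- 			ans.append(tup)
-- 	return ans
-- ===== SOURCE B (Python) =====
-- def num_casualty(s):
--     d = {'one': 1, 'two': 2, 'three': 3, 'four': 4, 'five': 5, 'six': 6,
--          'seven': 7, 'eight': 8, 'nine': 9, 'ten': 10, 'he': 1, 'she': 1}
--
--     def value(w):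
--         return int(w) if w.isdigit() else d.get(w)
--
--     # recursive window scan: walk the token list carrying the previous token
--     # and the absolute position; the next token is the head of the rest.
--     def go(prev, idx, toks):
--         if not toks:
--             return []
--         cur, rest = toks[0], toks[1:]
--         nxt = rest[0] if rest else None
--         tail = go(cur, idx + 1, rest)
--         v = value(cur)
--         if v is not None and nxt != 'year' and not (prev == ',' and nxt == ','):
--             return [(v, idx)] + tail
--         return tail
--
--     return go(None, 0, s.replace('-', ' ').split(' '))
-- ===== Notes on version B (the rewrite author's own statement) =====
-- stated objective: alternative
-- what changed: Replaces A's for-loop over range(len(l)) with random-access neighbor lookups l[i-1]/l[i+1] by a recursive sliding-window scan go(prev, idx, toks) that carries the previous token, reads the next token from the head of the rest, and builds the result back-to-front by consing onto the recursive tail.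
import Mathlib
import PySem

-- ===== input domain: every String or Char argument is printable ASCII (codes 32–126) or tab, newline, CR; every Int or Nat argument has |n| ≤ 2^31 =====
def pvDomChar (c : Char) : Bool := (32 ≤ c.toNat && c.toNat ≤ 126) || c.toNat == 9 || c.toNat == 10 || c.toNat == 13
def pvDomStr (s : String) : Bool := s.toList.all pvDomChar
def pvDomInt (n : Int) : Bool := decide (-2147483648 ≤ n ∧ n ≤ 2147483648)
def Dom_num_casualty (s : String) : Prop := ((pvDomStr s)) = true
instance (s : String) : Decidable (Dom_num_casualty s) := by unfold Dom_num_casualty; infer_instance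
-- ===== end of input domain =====

-- B replaces A's index loop with random access by a recursive prev/cur/next window scan that builds the output back-to-front; no speed claim.

-- ===== PORT A =====
-- the dict literal d of A (insertion order as written)
def ncDict : PySem.Dict String Int :=
  PySem.Dict.ofList [("one", 1), ("two", 2), ("three", 3), ("four", 4), ("five", 5),
    ("six", 6), ("seven", 7), ("eight", 8), ("nine", 9), ("ten", 10), ("he", 1), ("she", 1)]

def num_casualty (s : String) : List (Int × Int) :=
  let s := PySem.Str.replace s "-" " "
  let l := (PySem.Str.split? s " ").getD []
  (PySem.List.pyRange 0 (PySem.List.len l) 1).foldl (fun ans i =>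
    let w := PySem.List.pyGetD l i ""
    -- foundNumber/tup modelled as an Option: some v ↔ foundNumber=True with tup=(v,i)
    let found? : Option Int :=
      if PySem.Str.strIsdigit w then some ((PySem.Int.ofStr? w).getD 0)
      else if (ncDict.get? w).isSome then ncDict.get? w else none
    match found? with
    | some v =>
      if (¬ (i + 1 < PySem.List.len l ∧ PySem.List.pyGetD l (i + 1) "" = "year")) ∧
         (¬ (i - 1 ≥ 0 ∧ PySem.List.pyGetD l (i - 1) "" = "," ∧
             i + 1 < PySem.List.len l ∧ PySem.List.pyGetD l (i + 1) "" = ","))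
      then ans ++ [(v, i)] else ans
    | none => ans) []

-- ===== PORT B =====
def ncDictB : PySem.Dict String Int :=
  PySem.Dict.ofList [("one", 1), ("two", 2), ("three", 3), ("four", 4), ("five", 5),
    ("six", 6), ("seven", 7), ("eight", 8), ("nine", 9), ("ten", 10), ("he", 1), ("she", 1)]

-- value(w): int(w) if w.isdigit() else d.get(w)
def ncValue (w : String) : Option Int :=
  if PySem.Str.strIsdigit w then some ((PySem.Int.ofStr? w).getD 0) else ncDictB.get? w

-- go(prev, idx, toks): recursive window scan
def ncGo (prev : Option String) (idx : Int) : List String → List (Int × Int)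
  | [] => []
  | cur :: rest =>
    let nxt : Option String := rest.head?
    let tail := ncGo (some cur) (idx + 1) rest
    match ncValue cur with
    | some v =>
      if nxt ≠ some "year" ∧ ¬ (prev = some "," ∧ nxt = some ",") then (v, idx) :: tail
      else tail
    | none => tail

def num_casualty_alt (s : String) : List (Int × Int) :=
  ncGo none 0 ((PySem.Str.split? (PySem.Str.replace s "-" " ") " ").getD [])

-- ===== PRECONDITION & SPEC =====
def Spec_num_casualty (s : String) (out : List (Int × Int)) : Prop := out = num_casualty_alt s
instance (s : String) (out : List (Int × Int)) : Decidable (Spec_num_casualty s out) := by unfold Spec_num_casualty; infer_instance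

-- ===== CLAIM (what is proved, stated in full; the proofs are below) =====
def Claim_equal_num_casualty : Prop := ∀ (s : String), Dom_num_casualty s → Spec_num_casualty s (num_casualty s)

-- ===== LEMMAS AND PROOFS =====

-- A's elif cascade computes exactly ncValue
theorem nc_found_eq (w : String) :
    (if PySem.Str.strIsdigit w then some ((PySem.Int.ofStr? w).getD 0)
     else if (ncDict.get? w).isSome then ncDict.get? w else none) = ncValue w := by
  unfold ncValue
  by_cases h : PySem.Str.strIsdigit w = true
  · rw [if_pos h, if_pos h]
  · rw [if_neg h, if_neg h]
    have hd : ncDict = ncDictB := rfl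
    rw [hd]
    cases ncDictB.get? w <;>
      simp only [Option.isSome_none, Option.isSome_some, Bool.false_eq_true,
        if_false, if_true]

-- the index loop of A equals the window recursion of B on the corresponding suffix
theorem nc_loop (l : List String) :
    ∀ (t : List String) (k : ℕ) (acc : List (Int × Int)), l.drop k = t →
      (PySem.List.pyRange (k : Int) (PySem.List.len l) 1).foldl (fun ans i =>
        let w := PySem.List.pyGetD l i ""
        let found? : Option Int :=
          if PySem.Str.strIsdigit w then some ((PySem.Int.ofStr? w).getD 0)
          else if (ncDict.get? w).isSome then ncDict.get? w else none
        match found? with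
        | some v =>
          if (¬ (i + 1 < PySem.List.len l ∧ PySem.List.pyGetD l (i + 1) "" = "year")) ∧
             (¬ (i - 1 ≥ 0 ∧ PySem.List.pyGetD l (i - 1) "" = "," ∧
                 i + 1 < PySem.List.len l ∧ PySem.List.pyGetD l (i + 1) "" = ","))
          then ans ++ [(v, i)] else ans
        | none => ans) acc
      = acc ++ ncGo (if k = 0 then none else some (l.getD (k - 1) "")) (k : Int) t := by
  intro t
  induction t with
  | nil =>
    intro k acc hdrop
    have hk : l.length ≤ k := List.drop_eq_nil_iff.mp hdrop
    rw [PySem.List.pyRange_one_eq_nil (by simp [PySem.List.len]; exact_mod_cast hk)]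
    simp [ncGo]
  | cons cur rest ih =>
    intro k acc hdrop
    have hk : k < l.length := by
      by_contra h
      rw [List.drop_eq_nil_iff.mpr (by omega)] at hdrop
      simp at hdrop
    have hget : l[k]? = some cur := by
      have := congrArg List.head? hdrop
      rwa [List.head?_drop] at this
    have hrest : l.drop (k + 1) = rest := by
      have := congrArg List.tail hdrop
      rwa [List.tail_drop] at this
    have hcur : l.getD k "" = cur := by simp [List.getD, hget]
    rw [PySem.List.pyRange_one_cons (by simp [PySem.List.len]; exact_mod_cast hk)]
    rw [List.foldl_cons]
    -- evaluate the body at i = k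
    have hw : PySem.List.pyGetD l (k : Int) "" = cur := by
      rw [PySem.List.pyGetD_natCast, hcur]
    -- next-token condition
    have hnext : ∀ x : String,
        (((k : Int) + 1 < PySem.List.len l ∧ PySem.List.pyGetD l ((k : Int) + 1) "" = x)
          ↔ rest.head? = some x) := by
      intro x
      have h1 : ((k : Int) + 1) = ((k + 1 : ℕ) : Int) := by push_cast; ring
      have hh : rest.head? = l[k+1]? := by rw [← hrest, List.head?_drop]
      constructor
      · rintro ⟨hlt, hx⟩
        have hlt' : k + 1 < l.length := by
          have := hlt; simp [PySem.List.len] at this; exact_mod_cast this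
        rw [h1, PySem.List.pyGetD_natCast] at hx
        rw [hh, List.getElem?_eq_getElem hlt']
        simp [List.getD, List.getElem?_eq_getElem hlt'] at hx
        exact congrArg some hx
      · intro hx
        rw [hh] at hx
        have hlt' : k + 1 < l.length := by
          by_contra h
          rw [List.getElem?_eq_none (by omega)] at hx
          simp at hx
        refine ⟨by simp [PySem.List.len]; exact_mod_cast hlt', ?_⟩
        rw [h1, PySem.List.pyGetD_natCast]
        simp [List.getD, List.getElem?_eq_getElem hlt'] at hx ⊢
        exact hx
    -- prev-token condition
    have hprev :
        (((k : Int) - 1 ≥ 0 ∧ PySem.List.pyGetD l ((k : Int) - 1) "" = ","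
            ∧ (k : Int) + 1 < PySem.List.len l ∧ PySem.List.pyGetD l ((k : Int) + 1) "" = ",")
          ↔ ((if k = 0 then (none : Option String) else some (l.getD (k - 1) "")) = some ","
             ∧ rest.head? = some ",")) := by
      rcases Nat.eq_zero_or_pos k with hk0 | hk0
      · subst hk0; simp
      · rw [if_neg (by omega)]
        have h1 : ((k : Int) - 1) = ((k - 1 : ℕ) : Int) := by push_cast [hk0]; ring
        constructor
        · rintro ⟨_, hp, hn⟩
          refine ⟨?_, (hnext ",").mp hn⟩
          rw [h1, PySem.List.pyGetD_natCast] at hp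
          exact congrArg some hp
        · rintro ⟨hp, hn⟩
          refine ⟨by omega, ?_, (hnext ",").mpr hn⟩
          rw [h1, PySem.List.pyGetD_natCast]
          exact Option.some.inj hp
    simp only [hw]
    rw [nc_found_eq]
    show _ = acc ++ ncGo _ ((k : Int)) (cur :: rest)
    simp only [ncGo]
    have hstep : ((k : Int) + 1) = ((k + 1 : ℕ) : Int) := by push_cast; ring
    cases hv : ncValue cur with
    | none =>
      simp only [hv, Option.isSome_some]
      rw [hstep, ih (k + 1) acc hrest, if_neg (by omega), Nat.add_sub_cancel, hcur]
    | some v =>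
      simp only [hv, Option.isSome_some]
      by_cases hA :
          (¬ ((k : Int) + 1 < PySem.List.len l ∧ PySem.List.pyGetD l ((k : Int) + 1) "" = "year")) ∧
          (¬ ((k : Int) - 1 ≥ 0 ∧ PySem.List.pyGetD l ((k : Int) - 1) "" = "," ∧
              (k : Int) + 1 < PySem.List.len l ∧ PySem.List.pyGetD l ((k : Int) + 1) "" = ","))
      · rw [if_pos hA,
            if_pos (⟨fun h => hA.1 ((hnext "year").mpr h),
                     fun h => hA.2 (hprev.mpr h)⟩ :
              rest.head? ≠ some "year" ∧
              ¬ ((if k = 0 then (none : Option String) else some (l.getD (k - 1) "")) = some ","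
                 ∧ rest.head? = some ","))]
        rw [hstep, ih (k + 1) _ hrest, if_neg (by omega), Nat.add_sub_cancel, hcur,
            List.append_assoc]
        rfl
      · rw [if_neg hA,
            if_neg (fun hB => hA ⟨fun h => hB.1 ((hnext "year").mp h),
                                  fun h => hB.2 (hprev.mp h)⟩ :
              ¬ (rest.head? ≠ some "year" ∧
                 ¬ ((if k = 0 then (none : Option String) else some (l.getD (k - 1) "")) = some ","
                    ∧ rest.head? = some ",")))]
        rw [hstep, ih (k + 1) acc hrest, if_neg (by omega), Nat.add_sub_cancel, hcur]

-- ===== VERDICT (by name: the statement is the Claim_ definition above) =====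
theorem num_casualty_spec : Claim_equal_num_casualty := by
  intro s _
  show num_casualty s = num_casualty_alt s
  unfold num_casualty num_casualty_alt
  have h := nc_loop ((PySem.Str.split? (PySem.Str.replace s "-" " ") " ").getD [])
      ((PySem.Str.split? (PySem.Str.replace s "-" " ") " ").getD []) 0 [] (by simp)
  simpa using h
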